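-- pv_equiv track=rewrite | github.com/Mafiv/Competitive-Programing-Solutions-Stack | A2SV G6 - Round #3 28-Mar-2025/F - Binary Substrings with Exactly k Ones 320863.py | sub_for_k
-- ===== SOURCE A (Python) =====
-- def sub_for_k(k,arr):
--     if(k==-1):
--         return 0
--     l=0
--     count=0
--     ans=0
--     for i in range(len(arr)):
--         if(arr[i]=='1'):
--             count+=1
--         while(count>k):
--             if(arr[l]=='1'):
--                 count-=1
--             l+=1
--         ans+=i-l+1
--     return ans
-- ===== SOURCE B (Python) =====
-- def sub_for_k(k, arr):
--     if k < 0: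
--         return 0
--     ones = [i for i, ch in enumerate(arr) if ch == '1']
--     c = 0
--     ans = 0
--     for i, ch in enumerate(arr):
--         if ch == '1':
--             c += 1
--         l = ones[c - k - 1] + 1 if c > k else 0
--         ans += i - l + 1
--     return ans
-- ===== Notes on version B (the rewrite author's own statement) =====
-- stated objective: alternative
-- what changed: Replaces A's two-pointer inner while-loop (which re-walks the left end of the window) by a precomputed list of the indices of the ones: for each position the window start is obtained by a single direct lookup ones[c-k-1]+1 from the running prefix count c, so there is no inner loop and no left pointer at all.
import Mathlib
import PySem

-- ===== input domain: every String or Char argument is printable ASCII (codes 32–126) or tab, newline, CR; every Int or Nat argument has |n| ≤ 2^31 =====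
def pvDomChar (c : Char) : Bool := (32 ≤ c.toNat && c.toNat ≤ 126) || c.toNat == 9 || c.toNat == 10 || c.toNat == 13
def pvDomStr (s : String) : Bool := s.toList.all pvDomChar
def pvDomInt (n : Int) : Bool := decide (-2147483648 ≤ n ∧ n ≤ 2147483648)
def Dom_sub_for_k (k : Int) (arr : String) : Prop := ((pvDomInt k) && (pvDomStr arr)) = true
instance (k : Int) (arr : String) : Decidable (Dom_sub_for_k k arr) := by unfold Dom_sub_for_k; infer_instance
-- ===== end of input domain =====

-- B replaces A's two-pointer window (inner while moving l) by a precomputed index list of the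
-- positions of the ones, reading the window start directly from it — alternative decomposition.

-- ===== PORT A =====
-- Python's inner `while count>k: ...` loop; fuel bounds the iterations (the real loop makes at
-- most len(arr) steps before count ≤ k on every input Pre_ admits, so fuel len+1 is exact there).
def whileA (cs : List Char) (k : Int) : Nat → Int → Nat → Int × Nat
  | 0, count, l => (count, l)
  | fuel + 1, count, l =>
    if k < count then
      whileA cs k fuel (if cs.getD l ' ' = '1' then count - 1 else count) (l + 1)
    else (count, l)

-- one iteration of A's `for i in range(len(arr))` body; state = (count, l, ans)
def stepA (cs : List Char) (k : Int) (st : Int × Nat × Int) (i : Nat) : Int × Nat × Int :=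
  let count := if cs.getD i ' ' = '1' then st.1 + 1 else st.1
  let r := whileA cs k (cs.length + 1) count st.2.1
  (r.1, r.2, st.2.2 + (i : Int) - (r.2 : Int) + 1)

def sub_for_k (k : Int) (arr : String) : Int :=
  if k = -1 then 0
  else ((List.range arr.toList.length).foldl (stepA arr.toList k) (0, 0, 0)).2.2

-- ===== PORT B =====
-- `ones = [i for i, ch in enumerate(arr) if ch == '1']`
def onesOf (cs : List Char) : List Int :=
  ((PySem.List.enumerate cs 0).filter (fun p => p.2 == '1')).map Prod.fst

-- one iteration of B's loop body; state = (c, ans)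
def stepB (ones : List Int) (k : Int) (st : Int × Int) (p : Int × Char) : Int × Int :=
  let c := if p.2 = '1' then st.1 + 1 else st.1
  let l : Int := if k < c then (PySem.List.pyGet? ones (c - k - 1)).getD 0 + 1 else 0
  (c, st.2 + p.1 - l + 1)

def sub_for_k_alt (k : Int) (arr : String) : Int :=
  if k < 0 then 0
  else ((PySem.List.enumerate arr.toList 0).foldl (stepB (onesOf arr.toList) k) (0, 0)).2

-- ===== PRECONDITION & SPEC =====
-- Pre_ excludes exactly the inputs where A raises: for k ≤ -2 and nonempty arr the while
-- condition count>k never becomes false and arr[l] raises IndexError.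
def Pre_sub_for_k (k : Int) (arr : String) : Prop := -1 ≤ k ∨ arr = ""
instance (k : Int) (arr : String) : Decidable (Pre_sub_for_k k arr) := by
  unfold Pre_sub_for_k; infer_instance

def pvWitness_sub_for_k : Int × String := (1, "10110")


def Spec_sub_for_k (k : Int) (arr : String) (out : Int) : Prop := out = sub_for_k_alt k arr
instance (k : Int) (arr : String) (out : Int) : Decidable (Spec_sub_for_k k arr out) := by
  unfold Spec_sub_for_k; infer_instance

-- ===== CLAIM (what is proved, stated in full; the proofs are below) =====
def Claim_equal_sub_for_k : Prop := ∀ (k : Int) (arr : String), Dom_sub_for_k k arr → Pre_sub_for_k k arr → Spec_sub_for_k k arr (sub_for_k k arr)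

-- ===== LEMMAS AND PROOFS =====

-- pc cs j = number of '1' among the first j characters
def pc (cs : List Char) (j : Nat) : Nat := (cs.take j).count '1'

lemma pc_mono (cs : List Char) {i j : Nat} (h : i ≤ j) : pc cs i ≤ pc cs j := by
  unfold pc
  have : cs.take i = (cs.take j).take i := by rw [List.take_take, Nat.min_eq_left h]
  rw [this]
  exact (List.take_sublist _ _).count_le _

lemma take_concat (cs : List Char) {j : Nat} (h : j < cs.length) :
    cs.take (j + 1) = cs.take j ++ [cs[j]] := by
  rw [List.take_add_one, List.getElem?_eq_getElem h]
  rfl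

lemma getD_lt (cs : List Char) {j : Nat} (h : j < cs.length) : cs.getD j ' ' = cs[j] := by
  simp [List.getD, List.getElem?_eq_getElem h]

lemma pc_succ (cs : List Char) {j : Nat} (h : j < cs.length) :
    pc cs (j + 1) = pc cs j + (if cs.getD j ' ' = '1' then 1 else 0) := by
  unfold pc
  rw [take_concat cs h, List.count_append, getD_lt cs h]
  split_ifs with h1
  · simp [h1]
  · simp [List.count_singleton]
    omega

lemma pc_lt_of_lt (cs : List Char) {p m : Nat} (h : pc cs p < pc cs m) : p < m := by
  by_contra hc
  exact absurd (pc_mono cs (Nat.le_of_not_lt hc)) (by omega)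

lemma getD_append_lt {t : List Char} {c : Char} {i : Nat} (h : i < t.length) (d : Char) :
    (t ++ [c]).getD i d = t.getD i d := by
  simp [List.getD, List.getElem?_append_left h]

lemma getD_append_self (t : List Char) (c : Char) (d : Char) :
    (t ++ [c]).getD t.length d = c := by
  simp [List.getD, List.getElem?_append_right (Nat.le_refl t.length)]

lemma pc_append_le (t : List Char) (c : Char) {p : Nat} (h : p ≤ t.length) :
    pc (t ++ [c]) p = pc t p := by
  unfold pc
  rw [List.take_append_of_le_length h]

-- the list of positions of the ones, over Nat
def specOnes (cs : List Char) : List Nat :=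
  (List.range cs.length).filter (fun i => cs.getD i ' ' == '1')

lemma specOnes_append (t : List Char) (c : Char) :
    specOnes (t ++ [c]) = specOnes t ++ (if c = '1' then [t.length] else []) := by
  unfold specOnes
  rw [List.length_append, List.length_singleton, List.range_succ, List.filter_append]
  congr 1
  · apply List.filter_congr
    intro i hi
    rw [getD_append_lt (List.mem_range.mp hi) ' ']
  · rw [List.filter_singleton]
    rw [getD_append_self]
    by_cases h1 : c = '1'
    · simp [h1, cond_eq_if]
    · simp [h1, cond_eq_if]

lemma onesLen (cs : List Char) : (specOnes cs).length = pc cs cs.length := by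
  induction cs using List.reverseRecOn with
  | nil => rfl
  | append_singleton t c ih =>
      rw [specOnes_append, List.length_append]
      rw [List.length_append, List.length_singleton,
        pc_succ _ (by simp), getD_append_self, pc_append_le t c (Nat.le_refl _), ih]
      split_ifs <;> simp

lemma onesFacts (cs : List Char) :
    ∀ j, j < (specOnes cs).length →
      (specOnes cs).getD j 0 < cs.length ∧
      cs.getD ((specOnes cs).getD j 0) ' ' = '1' ∧
      pc cs ((specOnes cs).getD j 0) = j := by
  induction cs using List.reverseRecOn with
  | nil => intro j hj; simp [specOnes] at hj
  | append_singleton t c ih =>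
      intro j hj
      rw [specOnes_append] at hj ⊢
      by_cases hlt : j < (specOnes t).length
      · have hget : (specOnes t ++ (if c = '1' then [t.length] else [])).getD j 0 =
            (specOnes t).getD j 0 := by
          simp [List.getD, List.getElem?_append_left hlt]
        obtain ⟨h1, h2, h3⟩ := ih j hlt
        refine ⟨?_, ?_, ?_⟩
        · rw [hget, List.length_append, List.length_singleton]; omega
        · rw [hget, getD_append_lt h1]; exact h2
        · rw [hget, pc_append_le t c (Nat.le_of_lt h1)]; exact h3
      · -- j hits the appended element: c = '1' and j = (specOnes t).length
        rw [List.length_append] at hj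
        by_cases hc : c = '1'
        · rw [if_pos hc, List.length_singleton] at hj
          have hj' : j = (specOnes t).length := by omega
          have hget : (specOnes t ++ (if c = '1' then [t.length] else [])).getD j 0 =
              t.length := by
            subst hj'
            simp [hc, List.getD, List.getElem?_append_right (Nat.le_refl _)]
          refine ⟨?_, ?_, ?_⟩
          · rw [hget, List.length_append, List.length_singleton]; omega
          · rw [hget, getD_append_self]; exact hc
          · rw [hget, pc_append_le t c (Nat.le_refl _), hj', onesLen]
        · rw [if_neg hc, List.length_nil] at hj; omega

-- B's ones list is specOnes, cast to Int
lemma onesOf_eq (cs : List Char) : onesOf cs = (specOnes cs).map (Nat.cast : Nat → Int) := by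
  induction cs using List.reverseRecOn with
  | nil => rfl
  | append_singleton t c ih =>
      have hL : onesOf (t ++ [c]) = onesOf t ++
          (if c = '1' then [((t.length : Nat) : Int)] else []) := by
        unfold onesOf
        rw [PySem.List.enumerate_append, List.filter_append, List.map_append]
        congr 1
        rw [show PySem.List.enumerate [c] (0 + (t.length : Int)) =
            [((0 + (t.length : Int)), c)] from by
          rw [PySem.List.enumerate_cons]; rfl]
        by_cases h1 : c = '1'
        · simp [h1]
        · simp [h1]
      rw [hL, specOnes_append, List.map_append, ih]
      congr 1
      split_ifs <;> simp

-- the inner while loop establishes the window-start characterisation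
lemma whileA_spec (cs : List Char) (k : Int) (hk : 0 ≤ k) (M : Nat) (hM : M ≤ cs.length) :
    ∀ fuel (count : Int) (l : Nat),
      count = (pc cs M : Int) - (pc cs l : Int) → l ≤ M →
      (l = 0 ∨ (pc cs M : Int) - (pc cs (l - 1) : Int) > k) →
      M - l ≤ fuel →
      (whileA cs k fuel count l).1 =
          (pc cs M : Int) - (pc cs (whileA cs k fuel count l).2 : Int) ∧
      (whileA cs k fuel count l).2 ≤ M ∧
      (whileA cs k fuel count l).1 ≤ k ∧
      ((whileA cs k fuel count l).2 = 0 ∨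
          (pc cs M : Int) - (pc cs ((whileA cs k fuel count l).2 - 1) : Int) > k) := by
  intro fuel
  induction fuel with
  | zero =>
      intro count l h1 h2 h3 h4
      have hlM : l = M := by omega
      subst hlM
      simp only [whileA]
      exact ⟨h1, h2, by omega, h3⟩
  | succ fuel ih =>
      intro count l h1 h2 h3 h4
      by_cases hc : k < count
      · -- count > k ≥ 0, so l < M (else count would be 0)
        have hlM : l < M := by
          by_contra hcon
          have hle : l = M := by omega
          rw [hle] at h1
          omega
        have hrw : whileA cs k (fuel + 1) count l =
            whileA cs k fuel (if cs.getD l ' ' = '1' then count - 1 else count) (l + 1) := by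
          simp only [whileA, if_pos hc]
        rw [hrw]
        refine ih _ _ ?_ (by omega) ?_ (by omega)
        · split_ifs with hone
          · rw [pc_succ cs (show l < cs.length by omega), if_pos hone]
            push_cast
            omega
          · rw [pc_succ cs (show l < cs.length by omega), if_neg hone]
            push_cast
            omega
        · right
          simp only [Nat.add_sub_cancel]
          omega
      · have hrw : whileA cs k (fuel + 1) count l = (count, l) := by
          simp only [whileA, if_neg hc]
        rw [hrw]
        exact ⟨h1, h2, by omega, h3⟩

-- the characterisation determines the window start uniquely
lemma lchar_unique (cs : List Char) (k : Int) (M : Nat) {l1 l2 : Nat}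
    (h1a : (pc cs M : Int) - (pc cs l1 : Int) ≤ k)
    (h1b : l1 = 0 ∨ (pc cs M : Int) - (pc cs (l1 - 1) : Int) > k)
    (h2a : (pc cs M : Int) - (pc cs l2 : Int) ≤ k)
    (h2b : l2 = 0 ∨ (pc cs M : Int) - (pc cs (l2 - 1) : Int) > k) : l1 = l2 := by
  rcases Nat.lt_trichotomy l1 l2 with h | h | h
  · exfalso
    rcases h2b with h2b | h2b
    · omega
    · have := pc_mono cs (show l1 ≤ l2 - 1 by omega)
      omega
  · exact h
  · exfalso
    rcases h1b with h1b | h1b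
    · omega
    · have := pc_mono cs (show l2 ≤ l1 - 1 by omega)
      omega

-- the joint loop invariant: both folds over the first m characters agree
lemma joint (cs : List Char) (k : Int) (hk : 0 ≤ k) :
    ∀ m, m ≤ cs.length →
      ((PySem.List.enumerate (cs.take m) 0).foldl (stepB (onesOf cs) k) ((0 : Int), (0 : Int))).1
        = (pc cs m : Int) ∧
      ((List.range m).foldl (stepA cs k) ((0 : Int), (0 : Nat), (0 : Int))).1 =
        (pc cs m : Int) -
          (pc cs ((List.range m).foldl (stepA cs k) ((0 : Int), (0 : Nat), (0 : Int))).2.1 : Int) ∧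
      ((List.range m).foldl (stepA cs k) ((0 : Int), (0 : Nat), (0 : Int))).2.1 ≤ m ∧
      ((List.range m).foldl (stepA cs k) ((0 : Int), (0 : Nat), (0 : Int))).1 ≤ k ∧
      (((List.range m).foldl (stepA cs k) ((0 : Int), (0 : Nat), (0 : Int))).2.1 = 0 ∨
        (pc cs m : Int) -
          (pc cs (((List.range m).foldl (stepA cs k) ((0 : Int), (0 : Nat), (0 : Int))).2.1 - 1) : Int) > k) ∧
      ((List.range m).foldl (stepA cs k) ((0 : Int), (0 : Nat), (0 : Int))).2.2 =
        ((PySem.List.enumerate (cs.take m) 0).foldl (stepB (onesOf cs) k) ((0 : Int), (0 : Int))).2 := by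
  intro m
  induction m with
  | zero =>
      intro _
      refine ⟨rfl, rfl, Nat.le_refl 0, hk, Or.inl rfl, rfl⟩
  | succ m ih =>
      intro hm
      obtain ⟨hB1, hA1, hA2, hA3, hA4, hAB⟩ := ih (by omega)
      have hmlt : m < cs.length := by omega
      have htake : cs.take (m + 1) = cs.take m ++ [cs[m]] := take_concat cs hmlt
      have henum : PySem.List.enumerate (cs.take (m + 1)) 0 =
          PySem.List.enumerate (cs.take m) 0 ++ [((m : Int), cs[m])] := by
        rw [htake, PySem.List.enumerate_append]
        congr 1
        rw [PySem.List.enumerate_cons]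
        rw [show PySem.List.enumerate ([] : List Char) (0 + ((cs.take m).length : Int) + 1) = []
          from PySem.List.enumerate_nil _]
        rw [List.length_take, Nat.min_eq_left (Nat.le_of_lt hmlt)]
        norm_num
      rw [List.range_succ, List.foldl_append, henum, List.foldl_append,
        List.foldl_cons, List.foldl_nil, List.foldl_cons, List.foldl_nil]
      set Ast := (List.range m).foldl (stepA cs k) ((0 : Int), (0 : Nat), (0 : Int)) with hAst
      set Bst := (PySem.List.enumerate (cs.take m) 0).foldl (stepB (onesOf cs) k)
        ((0 : Int), (0 : Int)) with hBst
      have hgd : cs.getD m ' ' = cs[m] := getD_lt cs hmlt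
      have hpcs : pc cs (m + 1) = pc cs m + (if cs[m] = '1' then 1 else 0) := by
        rw [pc_succ cs hmlt, hgd]
      have hcount : (if cs.getD m ' ' = '1' then Ast.1 + 1 else Ast.1) =
          (pc cs (m + 1) : Int) - (pc cs Ast.2.1 : Int) := by
        rw [hgd]
        split_ifs with h <;> rw [hpcs] <;> simp [h] <;> push_cast <;> omega
      have hcB : (if cs[m] = '1' then Bst.1 + 1 else Bst.1) = (pc cs (m + 1) : Int) := by
        split_ifs with h <;> rw [hpcs] <;> simp [h, hB1] <;> push_cast <;> omega
      obtain ⟨hr1, hr2, hr3, hr4⟩ := whileA_spec cs k hk (m + 1) (by omega) (cs.length + 1)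
        (if cs.getD m ' ' = '1' then Ast.1 + 1 else Ast.1) Ast.2.1
        hcount (by omega)
        (by
          rcases hA4 with h | h
          · exact Or.inl h
          · right
            have := pc_mono cs (show m ≤ m + 1 by omega)
            omega)
        (by omega)
      have honesLen : (onesOf cs).length = pc cs cs.length := by
        rw [onesOf_eq, List.length_map, onesLen]
      -- B's directly-computed window start satisfies the same characterisation
      have hBl : ∃ lB : Nat, lB ≤ m + 1 ∧
          ((if k < (pc cs (m + 1) : Int) then
              (PySem.List.pyGet? (onesOf cs) ((pc cs (m + 1) : Int) - k - 1)).getD 0 + 1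
            else 0) = (lB : Int)) ∧
          (pc cs (m + 1) : Int) - (pc cs lB : Int) ≤ k ∧
          (lB = 0 ∨ (pc cs (m + 1) : Int) - (pc cs (lB - 1) : Int) > k) := by
        by_cases hbig : k < (pc cs (m + 1) : Int)
        · set j : Nat := pc cs (m + 1) - (k.toNat + 1) with hj
          have hjInt : ((pc cs (m + 1) : Int) - k - 1) = (j : Int) := by
            push_cast [hj]
            omega
          have hjlt' : j < (specOnes cs).length := by
            rw [onesLen]
            have := pc_mono cs (show m + 1 ≤ cs.length by omega)
            omega
          obtain ⟨hp1, hp2, hp3⟩ := onesFacts cs j hjlt'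
          set p : Nat := (specOnes cs).getD j 0 with hp
          have hget : PySem.List.pyGet? (onesOf cs) ((pc cs (m + 1) : Int) - k - 1) =
              some (p : Int) := by
            rw [hjInt, PySem.List.pyGet?_natCast, onesOf_eq, List.getElem?_map,
              List.getElem?_eq_getElem hjlt']
            simp only [Option.map_some]
            rw [hp, List.getD, List.getElem?_eq_getElem hjlt']
            rfl
          have hpc1 : pc cs (p + 1) = j + 1 := by
            rw [pc_succ cs hp1, if_pos hp2]
            omega
          have hplt : p < m + 1 := by
            apply pc_lt_of_lt cs
            rw [hp3]
            omega
          refine ⟨p + 1, by omega, ?_, ?_, ?_⟩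
          · rw [if_pos hbig, hget]
            simp only [Option.getD_some]
            push_cast
            ring
          · rw [hpc1]
            push_cast [hj]
            omega
          · right
            simp only [Nat.add_sub_cancel]
            rw [hp3]
            push_cast [hj]
            omega
        · refine ⟨0, by omega, by rw [if_neg hbig]; norm_num, ?_, Or.inl rfl⟩
          have : pc cs 0 = 0 := rfl
          rw [this]
          omega
      obtain ⟨lB, hlB1, hlB2, hlB3, hlB4⟩ := hBl
      have hleq : (whileA cs k (cs.length + 1)
          (if cs.getD m ' ' = '1' then Ast.1 + 1 else Ast.1) Ast.2.1).2 = lB :=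
        lchar_unique cs k (m + 1) (by omega) hr4 hlB3 hlB4
      refine ⟨?_, ?_, ?_, ?_, ?_, ?_⟩
      · simp only [stepB]
        exact hcB
      · simp only [stepA]
        exact hr1
      · simp only [stepA]
        rw [hleq]
        exact hlB1
      · simp only [stepA]
        exact hr3
      · simp only [stepA]
        rw [hleq]
        exact hlB4
      · simp only [stepA, stepB]
        rw [hAB, hleq, hcB, hlB2]

-- ===== VERDICT (by name: the statement is the Claim_ definition above) =====
theorem sub_for_k_spec : Claim_equal_sub_for_k := by
  intro k arr _ hpre
  show sub_for_k k arr = sub_for_k_alt k arr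
  rcases Int.lt_or_le k 0 with hneg | hk
  · -- k < 0: B returns 0; A returns 0 too (k = -1, or arr = "")
    rcases hpre with hk1 | hemp
    · have : k = -1 := by omega
      subst this
      simp [sub_for_k, sub_for_k_alt]
    · subst hemp
      simp [sub_for_k, sub_for_k_alt, hneg]
  · have hne : k ≠ -1 := by omega
    obtain ⟨_, _, _, _, _, hAB⟩ := joint arr.toList k hk arr.toList.length (Nat.le_refl _)
    rw [List.take_length] at hAB
    simp only [sub_for_k, sub_for_k_alt, if_neg hne, if_neg (by omega : ¬ k < 0)]
    exact hAB
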